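-- pv_equiv track=rewrite | github.com/Sachin-kumar-m/DSA-Practice | Subarrays/minmaxsubarray.py | optimizedApproact
-- ===== SOURCE A (Python) =====
-- def optimizedApproact(a):
--
--     n = len(a)
--
--     result = n
--     maxElement = 0
--     for i in a:
--         if i>maxElement:
--             maxElement = i
--     minElement = maxElement
--     for i in a:
--         if i<minElement:
--             minElement=i
--     if minElement==maxElement:
--         return 1
--     maxIndex = -1
--     minIndex = -1
--     for i in range(n-1,-1,-1):
--         if a[i]==minElement:
--             minIndex = i
--             if maxIndex!=-1:
--                 result = min(result,maxIndex-minIndex+1)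
--         elif a[i]==maxElement:
--             maxIndex = i
--             if minIndex!=-1:
--                 result = min(result,minIndex-maxIndex+1)
--     return result
-- ===== SOURCE B (Python) =====
-- def optimizedApproact(a):
--     n = len(a)
--     maxElement = 0
--     for i in a:
--         if i > maxElement:
--             maxElement = i
--     minElement = maxElement
--     for i in a:
--         if i < minElement:
--             minElement = i
--     if minElement == maxElement:
--         return 1
--     # collect positions of the min and of the max element (ascending)
--     mins = []
--     maxs = []
--     for idx, x in enumerate(a):
--         if x == minElement:
--             mins.append(idx)
--         elif x == maxElement:
--             maxs.append(idx)
--     # two-pointer merge walk over the two ascending position lists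
--     result = n
--     p = 0
--     q = 0
--     while p < len(mins) and q < len(maxs):
--         if mins[p] < maxs[q]:
--             result = min(result, maxs[q] - mins[p] + 1)
--             p += 1
--         else:
--             result = min(result, mins[p] - maxs[q] + 1)
--             q += 1
--     return result
-- ===== Notes on version B (the rewrite author's own statement) =====
-- stated objective: alternative
-- what changed: Replaces A's single backward scan that pairs each min/max occurrence with the nearest opposite occurrence to its right by building the two ascending position lists of the min and max element in one forward pass and then computing the minimal window with a two-pointer merge walk over those lists.
import Mathlib
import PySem

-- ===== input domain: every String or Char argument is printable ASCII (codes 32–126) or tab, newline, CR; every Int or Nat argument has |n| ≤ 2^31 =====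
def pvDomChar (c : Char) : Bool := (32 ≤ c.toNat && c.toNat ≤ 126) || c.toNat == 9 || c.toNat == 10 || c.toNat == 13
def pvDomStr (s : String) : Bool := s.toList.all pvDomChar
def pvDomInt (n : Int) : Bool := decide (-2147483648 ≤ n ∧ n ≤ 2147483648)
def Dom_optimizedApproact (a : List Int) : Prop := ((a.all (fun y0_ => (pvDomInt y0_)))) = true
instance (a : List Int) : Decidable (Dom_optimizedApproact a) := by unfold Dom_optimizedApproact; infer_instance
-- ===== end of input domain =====

-- B replaces A's backward nearest-opposite scan by position lists plus a two-pointer merge walk (alternative decomposition, same O(n) cost).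

-- ===== PORT A =====
def optimizedApproact (a : List Int) : Int :=
  let n : Int := a.length
  let maxElement := a.foldl (fun m i => if i > m then i else m) 0
  let minElement := a.foldl (fun m i => if i < m then i else m) maxElement
  if minElement = maxElement then 1
  else
    -- state (result, maxIndex, minIndex); indices i of range(n-1,-1,-1) are always in range, so pyGetD is exactly a[i]
    (((PySem.List.pyRange (n - 1) (-1) (-1)).foldl
      (fun (st : Int × Int × Int) i =>
        if PySem.List.pyGetD a i 0 = minElement then
          ((if st.2.1 ≠ -1 then min st.1 (st.2.1 - i + 1) else st.1), st.2.1, i)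
        else if PySem.List.pyGetD a i 0 = maxElement then
          ((if st.2.2 ≠ -1 then min st.1 (st.2.2 - i + 1) else st.1), i, st.2.2)
        else st)
      (n, -1, -1))).1

-- ===== PORT B =====
-- the while loop of Source B: two pointers p q into the position lists
def pvWalk (mins maxs : List Int) (p q : Nat) (result : Int) : Int :=
  if h : p < mins.length ∧ q < maxs.length then
    if mins[p]'h.1 < maxs[q]'h.2 then
      pvWalk mins maxs (p + 1) q (min result (maxs[q]'h.2 - mins[p]'h.1 + 1))
    else
      pvWalk mins maxs p (q + 1) (min result (mins[p]'h.1 - maxs[q]'h.2 + 1))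
  else result
termination_by (mins.length - p) + (maxs.length - q)
decreasing_by all_goals omega

def optimizedApproact_alt (a : List Int) : Int :=
  let n : Int := a.length
  let maxElement := a.foldl (fun m i => if i > m then i else m) 0
  let minElement := a.foldl (fun m i => if i < m then i else m) maxElement
  if minElement = maxElement then 1
  else
    let lists := (PySem.List.enumerate a 0).foldl
      (fun (acc : List Int × List Int) ix =>
        if ix.2 = minElement then (acc.1 ++ [ix.1], acc.2)
        else if ix.2 = maxElement then (acc.1, acc.2 ++ [ix.1])
        else acc)
      ([], [])
    pvWalk lists.1 lists.2 0 0 n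

-- ===== PRECONDITION & SPEC =====
def Spec_optimizedApproact (a : List Int) (out : Int) : Prop := out = optimizedApproact_alt a
instance (a : List Int) (out : Int) : Decidable (Spec_optimizedApproact a out) := by unfold Spec_optimizedApproact; infer_instance

-- ===== CLAIM (what is proved, stated in full; the proofs are below) =====
def Claim_equal_optimizedApproact : Prop := ∀ (a : List Int), Dom_optimizedApproact a → Spec_optimizedApproact a (optimizedApproact a)

-- ===== LEMMAS AND PROOFS =====

-- window length of the pair of positions (m, x) (m a min-position, x a max-position)
def pvDist (m x : Int) : Int := if m < x then x - m + 1 else m - x + 1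

-- min of r and the window length of every pair of positions
def pvPairs (ms xs : List Int) (r : Int) : Int :=
  ms.foldl (fun b m => xs.foldl (fun b x => min b (pvDist m x)) b) r

-- ascending positions (counted from k) of value v in l
def pvPos (l : List Int) (v : Int) (k : Int) : List Int :=
  match l with
  | [] => []
  | x :: xs => if x = v then k :: pvPos xs v (k + 1) else pvPos xs v (k + 1)

-- A's backward index loop, rephrased as structural recursion over the suffix values
def pvScanA (mn mx : Int) (l : List Int) (k : Int) (st : Int × Int × Int) : Int × Int × Int :=
  match l with
  | [] => st
  | x :: xs =>
      let st' := pvScanA mn mx xs (k + 1) st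
      if x = mn then ((if st'.2.1 ≠ -1 then min st'.1 (st'.2.1 - k + 1) else st'.1), st'.2.1, k)
      else if x = mx then ((if st'.2.2 ≠ -1 then min st'.1 (st'.2.2 - k + 1) else st'.1), k, st'.2.2)
      else st'

-- B's while loop, rephrased as structural recursion over the two lists
def pvWalkL (ms xs : List Int) (r : Int) : Int :=
  match ms, xs with
  | [], _ => r
  | _ :: _, [] => r
  | m :: mt, x :: xt =>
      if m < x then pvWalkL mt (x :: xt) (min r (x - m + 1))
      else pvWalkL (m :: mt) xt (min r (m - x + 1))

theorem pvInner_le (f : Int → Int) (l : List Int) (s : Int) :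
    List.foldl (fun b x => min b (f x)) s l ≤ s := by
  induction l generalizing s with
  | nil => simp
  | cons y ys ih => exact le_trans (ih _) (min_le_left _ _)

theorem pvInner_dom (f : Int → Int) (l : List Int) (s : Int)
    (h : ∀ x ∈ l, s ≤ f x) : List.foldl (fun b x => min b (f x)) s l = s := by
  induction l with
  | nil => rfl
  | cons y ys ih =>
      simp only [List.foldl_cons]
      rw [min_eq_left (h y (by simp))]
      exact ih (fun x hx => h x (by simp [hx]))

theorem pvInner_min (f : Int → Int) (l : List Int) (s t : Int) :
    List.foldl (fun b x => min b (f x)) (min s t) l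
      = min (List.foldl (fun b x => min b (f x)) s l) t := by
  induction l generalizing s with
  | nil => rfl
  | cons y ys ih =>
      simp only [List.foldl_cons]
      rw [min_right_comm s t (f y), ih]

theorem pvPairs_min (ms xs : List Int) (s t : Int) :
    pvPairs ms xs (min s t) = min (pvPairs ms xs s) t := by
  induction ms generalizing s with
  | nil => rfl
  | cons m mt ih =>
      simp only [pvPairs, List.foldl_cons] at *
      rw [pvInner_min, ih]

theorem pvPairs_nil_right (ms : List Int) (r : Int) : pvPairs ms [] r = r := by
  induction ms with
  | nil => rfl
  | cons m mt ih => exact ih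

-- a column x that is dominated (s already ≤ every pair with x) can be dropped
theorem pvPairs_drop_col (ms xt : List Int) (x s : Int)
    (h : ∀ m ∈ ms, s ≤ pvDist m x) : pvPairs ms (x :: xt) s = pvPairs ms xt s := by
  induction ms generalizing s with
  | nil => rfl
  | cons m mt ih =>
      simp only [pvPairs, List.foldl_cons] at *
      rw [min_eq_left (h m (by simp))]
      exact ih _ (fun m' hm' => le_trans (pvInner_le _ _ _) (h m' (by simp [hm'])))

-- peel the head of the left (min-position) list when it is below the whole right list
theorem pvPairs_cons_left (m x : Int) (mt xt : List Int) (r : Int)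
    (hx : ∀ x' ∈ xt, x ≤ x') (hmx : m < x) :
    pvPairs (m :: mt) (x :: xt) r = pvPairs mt (x :: xt) (min r (x - m + 1)) := by
  simp only [pvPairs, List.foldl_cons]
  congr 1
  have : pvDist m x = x - m + 1 := by simp [pvDist, hmx]
  rw [this]
  exact pvInner_dom _ _ _ (fun x' hx' => by
    have h1 := hx x' hx'
    have : pvDist m x' = x' - m + 1 := by simp [pvDist]; omega
    rw [this]; omega)

-- peel the head of the right (max-position) list when it is ≤ the whole left list
theorem pvPairs_cons (m : Int) (mt xs : List Int) (r : Int) :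
    pvPairs (m :: mt) xs r
      = pvPairs mt xs (List.foldl (fun b x => min b (pvDist m x)) r xs) := rfl

theorem pvPairs_cons_right (m x : Int) (mt xt : List Int) (r : Int)
    (hm : ∀ m' ∈ mt, m ≤ m') (hxm : x ≤ m) :
    pvPairs (m :: mt) (x :: xt) r = pvPairs (m :: mt) xt (min r (m - x + 1)) := by
  have hd : pvDist m x = m - x + 1 := by simp [pvDist]; omega
  rw [pvPairs_cons, List.foldl_cons, hd, pvPairs_cons]
  apply pvPairs_drop_col
  intro m' hm'
  have h1 : pvDist m' x = m' - x + 1 := by have := hm m' hm'; simp [pvDist]; omega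
  have h2 : List.foldl (fun b x' => min b (pvDist m x')) (min r (m - x + 1)) xt
      ≤ min r (m - x + 1) := pvInner_le _ _ _
  have h3 := hm m' hm'
  have h4 := min_le_right r (m - x + 1)
  rw [h1]; omega

theorem pvPos_ge (l : List Int) (v k : Int) : ∀ p ∈ pvPos l v k, k ≤ p := by
  induction l generalizing k with
  | nil => simp [pvPos]
  | cons x xs ih =>
      intro p hp
      simp only [pvPos] at hp
      split at hp
      · rcases List.mem_cons.mp hp with h | h
        · omega
        · have := ih (k + 1) p h; omega
      · have := ih (k + 1) p hp; omega

theorem pvPos_pairwise (l : List Int) (v k : Int) : (pvPos l v k).Pairwise (· ≤ ·) := by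
  induction l generalizing k with
  | nil => simp [pvPos]
  | cons x xs ih =>
      simp only [pvPos]
      split
      · exact List.pairwise_cons.mpr
          ⟨fun p hp => by have := pvPos_ge xs v (k + 1) p hp; omega, ih (k + 1)⟩
      · exact ih (k + 1)

-- the invariant of A's backward scan
theorem pvScanA_eq (mn mx N : Int) (hne : mn ≠ mx) (l : List Int) (k : Int) (hk : 0 ≤ k) :
    pvScanA mn mx l k (N, -1, -1)
      = (pvPairs (pvPos l mn k) (pvPos l mx k) N,
         (pvPos l mx k).headD (-1), (pvPos l mn k).headD (-1)) := by
  induction l generalizing k with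
  | nil => simp [pvScanA, pvPos, pvPairs]
  | cons x xs ih =>
      have ihx := ih (k + 1) (by omega)
      simp only [pvScanA, ihx]
      by_cases hmn : x = mn
      · have hposmx : pvPos (x :: xs) mx k = pvPos xs mx (k + 1) := by
          simp only [pvPos]; rw [if_neg (by rw [hmn]; exact hne)]
        have hposmn : pvPos (x :: xs) mn k = k :: pvPos xs mn (k + 1) := by
          simp only [pvPos]; rw [if_pos hmn]
        rw [if_pos hmn, hposmx, hposmn]
        rcases hX : pvPos xs mx (k + 1) with _ | ⟨M, rest⟩
        · simp [pvPairs_nil_right]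
        · have hM : k + 1 ≤ M := pvPos_ge xs mx (k + 1) M (by rw [hX]; simp)
          have hMne : (M ≠ -1) := by omega
          have hrest : ∀ x' ∈ rest, M ≤ x' := by
            have hpw := pvPos_pairwise xs mx (k + 1)
            rw [hX] at hpw
            exact fun x' hx' => (List.pairwise_cons.mp hpw).1 x' hx'
          rw [pvPairs_cons_left k M (pvPos xs mn (k + 1)) rest N hrest (by omega), pvPairs_min]
          simp [hMne]
      · by_cases hmx : x = mx
        · have hposmn : pvPos (x :: xs) mn k = pvPos xs mn (k + 1) := by
            simp only [pvPos]; rw [if_neg hmn]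
          have hposmx : pvPos (x :: xs) mx k = k :: pvPos xs mx (k + 1) := by
            simp only [pvPos]; rw [if_pos hmx]
          rw [if_neg hmn, if_pos hmx, hposmn, hposmx]
          rcases hX : pvPos xs mn (k + 1) with _ | ⟨m, rest⟩
          · simp [pvPairs]
          · have hm : k + 1 ≤ m := pvPos_ge xs mn (k + 1) m (by rw [hX]; simp)
            have hmne : (m ≠ -1) := by omega
            have hrest : ∀ m' ∈ rest, m ≤ m' := by
              have hpw := pvPos_pairwise xs mn (k + 1)
              rw [hX] at hpw
              exact fun m' hm' => (List.pairwise_cons.mp hpw).1 m' hm'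
            rw [pvPairs_cons_right m k rest (pvPos xs mx (k + 1)) N hrest (by omega), pvPairs_min]
            simp [hmne]
        · have hposmn : pvPos (x :: xs) mn k = pvPos xs mn (k + 1) := by
            simp only [pvPos]; rw [if_neg hmn]
          have hposmx : pvPos (x :: xs) mx k = pvPos xs mx (k + 1) := by
            simp only [pvPos]; rw [if_neg hmx]
          rw [if_neg hmn, if_neg hmx, hposmn, hposmx]

-- bridge: A's fold over range(n-1,-1,-1) with lookups is pvScanA over the suffix values
theorem pvFoldrA_eq (a : List Int) (mn mx : Int) (st : Int × Int × Int) :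
    ∀ (l : List Int) (k : Nat), a.drop k = l →
    List.foldr (fun i st =>
        (fun (st : Int × Int × Int) i =>
          if PySem.List.pyGetD a i 0 = mn then
            ((if st.2.1 ≠ -1 then min st.1 (st.2.1 - i + 1) else st.1), st.2.1, i)
          else if PySem.List.pyGetD a i 0 = mx then
            ((if st.2.2 ≠ -1 then min st.1 (st.2.2 - i + 1) else st.1), i, st.2.2)
          else st) st i) st
      (PySem.List.pyRange (k : Int) (a.length : Int) 1)
      = pvScanA mn mx l (k : Int) st := by
  intro l
  induction l generalizing st with
  | nil =>
      intro k hk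
      have hlen : a.length ≤ k := by
        rcases List.drop_eq_nil_iff.mp hk with h
        omega
      rw [PySem.List.pyRange_one_eq_nil (by exact_mod_cast hlen)]
      simp [pvScanA]
  | cons x xs ih =>
      intro k hk
      have hklt : k < a.length := by
        by_contra h
        rw [List.drop_eq_nil_of_le (by omega)] at hk
        simp at hk
      have hstep : PySem.List.pyRange (k : Int) (a.length : Int) 1
          = (k : Int) :: PySem.List.pyRange ((k : Int) + 1) (a.length : Int) 1 :=
        PySem.List.pyRange_one_cons (by exact_mod_cast hklt)
      have hget : PySem.List.pyGetD a (k : Int) 0 = x := by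
        rw [PySem.List.pyGetD_natCast]
        have : a[k]? = some x := by
          have h0 : (a.drop k)[0]? = a[k]? := by
            rw [List.getElem?_drop]; norm_num
          rw [hk] at h0
          simpa using h0.symm
        simp [List.getD, this]
      have hdrop : a.drop (k + 1) = xs := by
        have : a.drop (k + 1) = (a.drop k).drop 1 := by
          rw [List.drop_drop]
        rw [this, hk]
        simp
      have hcast : ((k : Int) + 1) = ((k + 1 : Nat) : Int) := by push_cast; ring
      rw [hstep, List.foldr_cons, hcast, ih st (k + 1) hdrop]
      simp only [pvScanA, hget, hcast]

-- bridge: B's pointer loop is the structural walk over the dropped lists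
theorem pvWalk_eq_walkL (mins maxs : List Int) (p q : Nat) (r : Int) :
    pvWalk mins maxs p q r = pvWalkL (mins.drop p) (maxs.drop q) r := by
  fun_induction pvWalk mins maxs p q r with
  | case1 p q r h hlt ih =>
      rw [List.drop_eq_getElem_cons h.1, List.drop_eq_getElem_cons h.2]
      simp only [pvWalkL]
      rw [if_pos hlt, ← List.drop_eq_getElem_cons h.2, ih]
  | case2 p q r h hlt ih =>
      rw [List.drop_eq_getElem_cons h.1, List.drop_eq_getElem_cons h.2]
      simp only [pvWalkL]
      rw [if_neg hlt, ← List.drop_eq_getElem_cons h.1, ih]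
  | case3 p q r h =>
      rcases Nat.lt_or_ge p mins.length with hp | hp
      · have hq : maxs.length ≤ q := by omega
        rw [List.drop_eq_nil_of_le hq]
        rcases hm : List.drop p mins with _ | ⟨m, mt⟩ <;> simp [pvWalkL]
      · rw [List.drop_eq_nil_of_le hp]; simp [pvWalkL]

-- the two-pointer walk computes the min over all pairs, given both lists ascending
theorem pvWalkL_eq_pairs (ms xs : List Int) (r : Int) :
    ms.Pairwise (· ≤ ·) → xs.Pairwise (· ≤ ·) → pvWalkL ms xs r = pvPairs ms xs r := by
  fun_induction pvWalkL ms xs r with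
  | case1 xs r => intro _ _; simp [pvPairs]
  | case2 r m mt => intro _ _; rw [pvPairs_nil_right]
  | case3 r m mt x xt hlt ih =>
      intro hms hxs
      rw [ih (List.pairwise_cons.mp hms).2 hxs,
        pvPairs_cons_left m x mt xt r (List.pairwise_cons.mp hxs).1 hlt]
  | case4 r m mt x xt hlt ih =>
      intro hms hxs
      rw [ih hms (List.pairwise_cons.mp hxs).2,
        pvPairs_cons_right m x mt xt r (List.pairwise_cons.mp hms).1 (by omega)]

-- B's builder loop produces pvPos for both values
theorem pvBuild_eq (mn mx : Int) (hne : mn ≠ mx) :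
    ∀ (l : List Int) (k : Int) (am ax : List Int),
    (PySem.List.enumerate l k).foldl
      (fun (acc : List Int × List Int) ix =>
        if ix.2 = mn then (acc.1 ++ [ix.1], acc.2)
        else if ix.2 = mx then (acc.1, acc.2 ++ [ix.1])
        else acc)
      (am, ax)
    = (am ++ pvPos l mn k, ax ++ pvPos l mx k) := by
  intro l
  induction l with
  | nil => intro k am ax; simp [PySem.List.enumerate_nil, pvPos]
  | cons x xs ih =>
      intro k am ax
      have hposn : pvPos (x :: xs) mn k
          = if x = mn then k :: pvPos xs mn (k + 1) else pvPos xs mn (k + 1) := rfl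
      have hposx : pvPos (x :: xs) mx k
          = if x = mx then k :: pvPos xs mx (k + 1) else pvPos xs mx (k + 1) := rfl
      simp only [PySem.List.enumerate_cons, List.foldl_cons]
      by_cases hmn : x = mn
      · rw [if_pos hmn, ih, hposn, if_pos hmn, hposx,
          if_neg (by rw [hmn]; exact hne)]
        simp
      · by_cases hmx : x = mx
        · rw [if_neg hmn, if_pos hmx, ih, hposn, if_neg hmn, hposx, if_pos hmx]
          simp
        · rw [if_neg hmn, if_neg hmx, ih, hposn, if_neg hmn, hposx, if_neg hmx]

theorem pvMain (a : List Int) : optimizedApproact a = optimizedApproact_alt a := by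
  unfold optimizedApproact optimizedApproact_alt
  simp only []
  set mx := a.foldl (fun m i => if i > m then i else m) 0 with hmx
  set mn := a.foldl (fun m i => if i < m then i else m) mx with hmn
  by_cases h : mn = mx
  · simp [h]
  · rw [if_neg h, if_neg h]
    -- A side
    have hrange : PySem.List.pyRange ((a.length : Int) - 1) (-1) (-1)
        = (PySem.List.pyRange 0 (a.length : Int) 1).reverse := by
      rw [PySem.List.pyRange_neg_one_eq_reverse]
      norm_num
    rw [hrange, List.foldl_reverse]
    have hA := pvFoldrA_eq a mn mx ((a.length : Int), -1, -1) a 0 (by simp)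
    simp only [Nat.cast_zero] at hA
    rw [hA, pvScanA_eq mn mx (a.length : Int) h a 0 le_rfl]
    -- B side
    rw [pvBuild_eq mn mx h a 0 [] []]
    simp only [List.nil_append]
    rw [pvWalk_eq_walkL, List.drop_zero, List.drop_zero,
      pvWalkL_eq_pairs _ _ _ (pvPos_pairwise a mn 0) (pvPos_pairwise a mx 0)]

-- ===== VERDICT (by name: the statement is the Claim_ definition above) =====
theorem optimizedApproact_spec : Claim_equal_optimizedApproact := by
  intro a _
  unfold Spec_optimizedApproact
  exact pvMain a
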